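-- pv_equiv track=rewrite | github.com/teloric/MageImbue | itemscript.py | generate_standard_duration_array
-- ===== SOURCE A (Python) =====
-- def generate_standard_duration_array(number):
--     # Define the initial pattern for turns
--     turns_pattern = list(range(1, number + 1)) + list(range(number + 10, number * 10 + 10, 10))
--
--     # Construct the array
--     array = []
--     dice_penalty = 0
--     for turns in turns_pattern:
--         # Add the dice penalty only after reaching the given number
--         if turns > number:
--             dice_penalty += 2
--         array.append(f"{turns} turn{'s' if turns > 1 else ''} (-{dice_penalty} dice)")
--
--     return array
-- ===== SOURCE B (Python) =====
-- def generate_standard_duration_array(number):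
--     # First pass: turns 1..number, no penalty yet.
--     singles = [f"{t} turn{'s' if t > 1 else ''} (-0 dice)" for t in range(1, number + 1)]
--     # Second pass: penalty is closed-form 2*(i+1) for the i-th extended entry (always plural).
--     extended = [f"{t} turns (-{2 * (i + 1)} dice)"
--                 for i, t in enumerate(range(number + 10, number * 10 + 10, 10))]
--     return singles + extended
-- ===== Notes on version B (the rewrite author's own statement) =====
-- stated objective: simpler
-- what changed: Replaces the single accumulator loop (running dice_penalty and a branch per element) with two independent comprehensions: the 1..number segment with constant '-0 dice', and the extended segment whose penalty is the closed form 2*(i+1) from the enumeration index.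
import Mathlib
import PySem

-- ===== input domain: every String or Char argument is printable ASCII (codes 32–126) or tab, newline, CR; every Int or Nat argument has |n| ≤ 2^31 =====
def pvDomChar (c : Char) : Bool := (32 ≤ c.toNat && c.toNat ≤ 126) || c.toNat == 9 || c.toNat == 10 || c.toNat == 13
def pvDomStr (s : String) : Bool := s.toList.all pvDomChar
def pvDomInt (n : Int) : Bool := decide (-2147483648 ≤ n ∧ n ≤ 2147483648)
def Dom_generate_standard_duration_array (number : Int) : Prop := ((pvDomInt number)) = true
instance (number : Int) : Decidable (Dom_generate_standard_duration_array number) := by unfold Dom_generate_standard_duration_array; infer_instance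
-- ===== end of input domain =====

-- B replaces A's single accumulator loop (running dice_penalty + branch) with two independent
-- comprehensions, the second using the closed-form penalty 2*(i+1); objective: simpler.


-- ===== PORT A =====
-- loop body of A: append the formatted string, updating the running dice_penalty
def gsdaStep (number : Int) (st : List String × Int) (turns : Int) : List String × Int :=
  let dice_penalty := if number < turns then st.2 + 2 else st.2
  (st.1 ++ [PySem.Int.toStr turns ++ " turn" ++ (if 1 < turns then "s" else "") ++
            " (-" ++ PySem.Int.toStr dice_penalty ++ " dice)"],
   dice_penalty)

def generate_standard_duration_array (number : Int) : List String :=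
  let turns_pattern := PySem.List.pyRange 1 (number + 1) 1 ++
                       PySem.List.pyRange (number + 10) (number * 10 + 10) 10
  (turns_pattern.foldl (gsdaStep number) ([], 0)).1

-- ===== PORT B =====
def generate_standard_duration_array_alt (number : Int) : List String :=
  let singles := (PySem.List.pyRange 1 (number + 1) 1).map
    (fun t => PySem.Int.toStr t ++ " turn" ++ (if 1 < t then "s" else "") ++ " (-0 dice)")
  let extended := (PySem.List.enumerate (PySem.List.pyRange (number + 10) (number * 10 + 10) 10)).map
    (fun p => PySem.Int.toStr p.2 ++ " turns (-" ++ PySem.Int.toStr (2 * (p.1 + 1)) ++ " dice)")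
  singles ++ extended

-- ===== PRECONDITION & SPEC =====
def Spec_generate_standard_duration_array (number : Int) (out : List String) : Prop := out = generate_standard_duration_array_alt number
instance (number : Int) (out : List String) : Decidable (Spec_generate_standard_duration_array number out) := by unfold Spec_generate_standard_duration_array; infer_instance

-- ===== CLAIM (what is proved, stated in full; the proofs are below) =====
def Claim_equal_generate_standard_duration_array : Prop := ∀ (number : Int), Dom_generate_standard_duration_array number → Spec_generate_standard_duration_array number (generate_standard_duration_array number)

-- ===== LEMMAS AND PROOFS =====

-- literal string concatenations used by the two ports
theorem gsda_str_zero (x s : String) :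
    x ++ " turn" ++ s ++ " (-" ++ PySem.Int.toStr 0 ++ " dice)" = x ++ " turn" ++ s ++ " (-0 dice)" := by
  simp [String.append_assoc]; decide

theorem gsda_str_plural (x y : String) :
    x ++ " turn" ++ "s" ++ " (-" ++ y ++ " dice)" = x ++ " turns (-" ++ y ++ " dice)" := by
  simp [String.append_assoc]

-- first segment: all turns ≤ number, penalty stays 0
theorem gsda_fold_low (number : Int) (L : List Int) (h : ∀ t ∈ L, t ≤ number) (acc : List String) :
    L.foldl (gsdaStep number) (acc, 0) =
      (acc ++ L.map (fun t => PySem.Int.toStr t ++ " turn" ++ (if 1 < t then "s" else "") ++ " (-0 dice)"), 0) := by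
  induction L generalizing acc with
  | nil => simp
  | cons t L ih =>
    have ht : t ≤ number := h t (by simp)
    have hnot : ¬ number < t := not_lt.mpr ht
    simp only [List.foldl_cons, List.map_cons, gsdaStep, if_neg hnot,
      ih (fun u hu => h u (by simp [hu]))]
    rw [gsda_str_zero]
    simp

-- second segment: all turns > number and > 1; starting penalty 2*k, the i-th element gets 2*(k+i+1)
theorem gsda_fold_high (number : Int) (L : List Int) (h : ∀ t ∈ L, number < t ∧ 1 < t) :
    ∀ (k : Int) (acc : List String),
    L.foldl (gsdaStep number) (acc, 2 * k) =
      (acc ++ (PySem.List.enumerate L k).map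
        (fun p => PySem.Int.toStr p.2 ++ " turns (-" ++ PySem.Int.toStr (2 * (p.1 + 1)) ++ " dice)"),
       2 * (k + L.length)) := by
  induction L with
  | nil => simp
  | cons t L ih =>
    intro k acc
    obtain ⟨hgt, h1⟩ := h t (by simp)
    have step : 2 * k + 2 = 2 * (k + 1) := by ring
    simp only [List.foldl_cons, gsdaStep, if_pos hgt, if_pos h1, step,
      PySem.List.enumerate_cons, List.map_cons,
      ih (fun u hu => h u (by simp [hu])) (k + 1)]
    rw [gsda_str_plural]
    simp only [Prod.mk.injEq, List.length_cons]
    exact ⟨by simp, by push_cast; ring⟩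

-- ===== VERDICT (by name: the statement is the Claim_ definition above) =====
theorem generate_standard_duration_array_spec : Claim_equal_generate_standard_duration_array := by
  intro number _
  show _ = _
  unfold generate_standard_duration_array generate_standard_duration_array_alt
  simp only [List.foldl_append]
  rw [gsda_fold_low number _ (fun t ht => by
        have := (PySem.List.mem_pyRange_one).mp ht; omega) []]
  have h2 : ∀ t ∈ PySem.List.pyRange (number + 10) (number * 10 + 10) 10, number < t ∧ 1 < t := by
    intro t ht
    have := (PySem.List.mem_pyRange_iff_of_pos (by norm_num) t).mp ht
    omega
  have h0 := gsda_fold_high number _ h2 0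
    ((PySem.List.pyRange 1 (number + 1) 1).map
      (fun t => PySem.Int.toStr t ++ " turn" ++ (if 1 < t then "s" else "") ++ " (-0 dice)"))
  norm_num at h0
  simp only [List.nil_append]
  rw [h0]
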